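-- pv_equiv track=rewrite | github.com/Nghia03092004/nghia03092004.github.io | project_euler_unified/problem_844/solution.py | count_sequences_matrix
-- ===== SOURCE A (Python) =====
-- MOD = 10**9 + 7
--
-- def mat_mul(A, B, mod):
--     """Multiply two matrices modulo mod."""
--     n = len(A)
--     m = len(B[0])
--     k = len(B)
--     C = [[0]*m for _ in range(n)]
--     for i in range(n):
--         for j in range(m):
--             s = 0
--             for l in range(k):
--                 s += A[i][l] * B[l][j]
--             C[i][j] = s % mod
--     return C
--
-- def mat_pow(M, p, mod):
--     """Compute M^p mod mod via binary exponentiation."""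
--     n = len(M)
--     result = [[1 if i == j else 0 for j in range(n)] for i in range(n)]
--     while p > 0:
--         if p & 1:
--             result = mat_mul(result, M, mod)
--         M = mat_mul(M, M, mod)
--         p >>= 1
--     return result
--
-- def count_sequences_matrix(sigma, k, n, forbidden=None, mod=MOD):
--     """Count valid k-Markov sequences of length n.
--     forbidden: set of (k+1)-grams that are not allowed.
--     """
--     if forbidden is None:
--         forbidden = set()
--
--     states = sigma ** k
--     # Build transfer matrix
--     M = [[0]*states for _ in range(states)]
--     for s in range(states):
--         # Decode state s as a k-gram
--         digits_s = []
--         val = s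
--         for _ in range(k):
--             digits_s.append(val % sigma)
--             val //= sigma
--         digits_s.reverse()
--
--         for c in range(sigma):
--             # New state: last (k-1) digits of s + c
--             gram = tuple(digits_s) + (c,)
--             if gram in forbidden:
--                 continue
--             t = 0
--             for d in digits_s[1:]:
--                 t = t * sigma + d
--             t = t * sigma + c
--             M[s][t] = 1
--
--     if n < k:
--         return sigma ** n
--
--     # Total sequences = sum of all entries in M^(n-k) * initial vector
--     Mp = mat_pow(M, n - k, mod)
--     total = 0
--     for i in range(states):
--         for j in range(states):
--             total = (total + Mp[i][j]) % mod
--     return total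
-- ===== SOURCE B (Python) =====
-- MOD = 10**9 + 7
--
-- def count_sequences_matrix(sigma, k, n, forbidden=None, mod=MOD):
--     """Count valid k-Markov sequences of length n.
--     forbidden: set of (k+1)-grams that are not allowed.
--     Sparse row-dict transition maps composed by recursive squaring.
--     """
--     if forbidden is None:
--         forbidden = set()
--
--     if n < k:
--         return sigma ** n
--
--     states = sigma ** k
--
--     # Sparse transition: rows[s] = {t: 1} for each allowed successor t of state s.
--     rows = []
--     for s in range(states):
--         digits = []
--         val = s
--         for _ in range(k):
--             digits.append(val % sigma)
--             val //= sigma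
--         digits.reverse()
--         tail = 0
--         for d in digits[1:]:
--             tail = tail * sigma + d
--         row = {}
--         for c in range(sigma):
--             if tuple(digits) + (c,) not in forbidden:
--                 row[tail * sigma + c] = 1
--         rows.append(row)
--
--     if n == k:
--         return states % mod
--
--     def compose(X, Y):
--         Z = []
--         for row in X:
--             acc = {}
--             for t, w in row.items():
--                 for u, w2 in Y[t].items():
--                     acc[u] = (acc.get(u, 0) + w * w2) % mod
--             Z.append(acc)
--         return Z
--
--     def matpow(p):
--         # p >= 1
--         if p == 1:
--             return rows
--         half = matpow(p // 2)
--         sq = compose(half, half)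
--         return compose(sq, rows) if p % 2 else sq
--
--     F = matpow(n - k)
--     return sum(w for row in F for w in row.values()) % mod
-- ===== Notes on version B (the rewrite author's own statement) =====
-- stated objective: alternative
-- what changed: Replaces the dense list-of-lists transfer matrix and the iterative bit-loop mat_pow by sparse per-state successor dicts composed with a recursive squaring function (no identity matrix; the n == k case is answered directly), summing the sparse weights at the end.
-- outside the precondition, e.g. on count_sequences_matrix(-4, 1, 1, None, 3): A returns 0, B returns 2; on count_sequences_matrix(0, 1, 1, None, 0): A returns 0, B raises ZeroDivisionError; on count_sequences_matrix(2, 1, -1, None, 7): A returns 0.5, B returns 0.5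
import Mathlib
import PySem

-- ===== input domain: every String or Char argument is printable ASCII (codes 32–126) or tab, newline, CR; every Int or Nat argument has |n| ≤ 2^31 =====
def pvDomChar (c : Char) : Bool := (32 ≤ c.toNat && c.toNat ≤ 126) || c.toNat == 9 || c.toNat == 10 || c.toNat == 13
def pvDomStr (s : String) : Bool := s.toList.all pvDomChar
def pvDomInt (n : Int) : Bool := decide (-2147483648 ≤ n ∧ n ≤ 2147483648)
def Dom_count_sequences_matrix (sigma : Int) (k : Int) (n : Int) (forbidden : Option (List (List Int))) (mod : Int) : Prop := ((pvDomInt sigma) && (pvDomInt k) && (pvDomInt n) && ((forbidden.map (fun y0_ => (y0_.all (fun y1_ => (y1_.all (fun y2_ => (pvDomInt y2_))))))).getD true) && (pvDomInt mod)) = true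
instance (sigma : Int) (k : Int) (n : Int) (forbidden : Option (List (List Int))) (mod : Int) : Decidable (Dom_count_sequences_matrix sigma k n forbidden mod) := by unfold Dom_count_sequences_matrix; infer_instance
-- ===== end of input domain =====

-- B replaces A's dense list-of-lists transfer matrix and iterative bit-loop mat_pow by sparse
-- per-state successor dicts composed with a recursive squaring function (objective: alternative);
-- return values agree on Pre_.

-- ===== PORT A =====
-- mat_mul(A, B, mod): C[i][j] = sum_l A[i][l]*B[l][j] % mod  (indices are in range on admitted inputs)
def pvMatMul (A B : List (List Int)) (mod : Int) : List (List Int) :=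
  let n := A.length
  let m := (B.getD 0 []).length   -- len(B[0]); B is nonempty on admitted inputs
  let kk := B.length
  (List.range n).map (fun i =>
    (List.range m).map (fun j =>
      PySem.Int.mod ((List.range kk).foldl
        (fun s l => s + ((A.getD i []).getD l 0) * ((B.getD l []).getD j 0)) 0) mod))

-- identity matrix built in mat_pow
def pvIdentity (n : Nat) : List (List Int) :=
  (List.range n).map (fun i => (List.range n).map (fun j => if i = j then (1 : Int) else 0))

-- the `while p > 0` loop of mat_pow (p ≥ 0 in Python; `p & 1` = p % 2 = 1, `p >>= 1` = p / 2)
def pvMatPowGo (result M : List (List Int)) (mod : Int) (p : Nat) : List (List Int) :=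
  if p = 0 then result
  else
    pvMatPowGo (if p % 2 = 1 then pvMatMul result M mod else result) (pvMatMul M M mod) mod (p / 2)
termination_by p
decreasing_by exact Nat.div_lt_self (Nat.pos_of_ne_zero (by assumption)) (by omega)

def pvMatPow (M : List (List Int)) (p : Nat) (mod : Int) : List (List Int) :=
  pvMatPowGo (pvIdentity M.length) M mod p

-- decode state s as a k-gram: append val % sigma, val //= sigma, k times, then reverse
def pvDigits (sigma : Int) (k : Nat) (s : Int) : List Int :=
  ((List.range k).foldl
    (fun (p : List Int × Int) _ => (p.1 ++ [PySem.Int.mod p.2 sigma], PySem.Int.floordiv p.2 sigma))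
    ([], s)).1.reverse

-- the `for c in range(sigma)` loop writing row s of M (the only row this s-iteration touches);
-- `tuple(digits_s) + (c,)` is the list ds ++ [c] under the convention; t is a valid nonnegative
-- index on admitted inputs, hence `.set t.toNat`.
def pvRow (sigma : Int) (k : Nat) (N : Nat) (fb : List (List Int)) (s : Int) : List Int :=
  let ds := pvDigits sigma k s
  (PySem.List.pyRange 0 sigma 1).foldl
    (fun row c =>
      if ds ++ [c] ∈ fb then row
      else row.set (((ds.drop 1).foldl (fun t d => t * sigma + d) 0) * sigma + c).toNat 1)
    (List.replicate N 0)

def count_sequences_matrix (sigma : Int) (k : Int) (n : Int) (forbidden : Option (List (List Int))) (mod : Int) : Int :=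
  let fb := forbidden.getD []          -- `if forbidden is None: forbidden = set()`
  let states : Int := sigma ^ k.toNat
  let N := states.toNat
  let M := (List.range N).map (fun (s : Nat) => pvRow sigma k.toNat N fb (s : Int))
  if n < k then sigma ^ n.toNat
  else
    let Mp := pvMatPow M (n - k).toNat mod
    (List.range N).foldl (fun total i =>
      (List.range N).foldl (fun total j =>
        PySem.Int.mod (total + (Mp.getD i []).getD j 0) mod) total) 0

-- ===== PORT B =====
-- sparse row of state s: {t: 1} for each allowed successor (same digit decoding as the Python)
def pvRowB (sigma : Int) (k : Nat) (fb : List (List Int)) (s : Int) : PySem.Dict Int Int :=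
  let ds := pvDigits sigma k s
  let tail := (ds.drop 1).foldl (fun t d => t * sigma + d) 0
  (PySem.List.pyRange 0 sigma 1).foldl
    (fun row c => if ds ++ [c] ∈ fb then row else row.insert (tail * sigma + c) 1)
    PySem.Dict.empty

-- compose(X, Y): Z[s][u] = sum_t X[s][t]*Y[t][u] % mod, kept sparse (`acc.get(u, 0)` = getD u 0;
-- the list index Y[t] is nonnegative and in range on admitted inputs, hence `.toNat`)
def pvCompose (mod : Int) (X Y : List (PySem.Dict Int Int)) : List (PySem.Dict Int Int) :=
  X.map (fun row =>
    row.items.foldl (fun acc tw =>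
      (Y.getD tw.1.toNat PySem.Dict.empty).items.foldl (fun acc uw =>
        acc.insert uw.1 (PySem.Int.mod (acc.getD uw.1 0 + tw.2 * uw.2) mod)) acc)
      PySem.Dict.empty)

-- matpow(p): recursive squaring; the Python is only ever called with p ≥ 1 (its base case is
-- p == 1), so the p = 0 case, written `p ≤ 1` here for termination, is unreachable
def pvMatPowB (rows : List (PySem.Dict Int Int)) (mod : Int) (p : Nat) : List (PySem.Dict Int Int) :=
  if p ≤ 1 then rows
  else
    let half := pvMatPowB rows mod (p / 2)
    let sq := pvCompose mod half half
    if p % 2 = 1 then pvCompose mod sq rows else sq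
termination_by p
decreasing_by exact Nat.div_lt_self (by omega) (by omega)

def count_sequences_matrix_alt (sigma : Int) (k : Int) (n : Int) (forbidden : Option (List (List Int))) (mod : Int) : Int :=
  let fb := forbidden.getD []
  if n < k then sigma ^ n.toNat
  else
    let states : Int := sigma ^ k.toNat
    let N := states.toNat
    let rows := (List.range N).map (fun (s : Nat) => pvRowB sigma k.toNat fb (s : Int))
    if n = k then PySem.Int.mod states mod
    else
      let F := pvMatPowB rows mod (n - k).toNat
      PySem.Int.mod ((F.map (fun row => row.values.sum)).sum) mod

-- ===== PRECONDITION & SPEC =====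
-- Pre_ excludes: k < 0 or n < 0 (A returns a float or raises TypeError), mod = 0 with n ≥ k
-- (ZeroDivisionError, except in empty-state corners), sigma ≤ 0 (A's sigma**k state count is
-- meaningless: it raises IndexError for n > k and its returns at n ≤ k are accidents of the empty
-- `range`), and k = 0 with sigma ≥ 2 (A raises IndexError writing M[0][c] past row 0).
def Pre_count_sequences_matrix (sigma : Int) (k : Int) (n : Int) (forbidden : Option (List (List Int))) (mod : Int) : Prop :=
  1 ≤ sigma ∧ 0 ≤ k ∧ 0 ≤ n ∧ (mod ≠ 0 ∨ n < k) ∧ (1 ≤ k ∨ sigma = 1)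
instance (sigma : Int) (k : Int) (n : Int) (forbidden : Option (List (List Int))) (mod : Int) : Decidable (Pre_count_sequences_matrix sigma k n forbidden mod) := by unfold Pre_count_sequences_matrix; infer_instance

def pvWitness_count_sequences_matrix : Int × Int × Int × Option (List (List Int)) × Int := (2, 2, 5, some [[0, 0, 0]], 7)

def Spec_count_sequences_matrix (sigma : Int) (k : Int) (n : Int) (forbidden : Option (List (List Int))) (mod : Int) (out : Int) : Prop := out = count_sequences_matrix_alt sigma k n forbidden mod
instance (sigma : Int) (k : Int) (n : Int) (forbidden : Option (List (List Int))) (mod : Int) (out : Int) : Decidable (Spec_count_sequences_matrix sigma k n forbidden mod out) := by unfold Spec_count_sequences_matrix; infer_instance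

-- ===== CLAIM (what is proved, stated in full; the proofs are below) =====
def Claim_equal_count_sequences_matrix : Prop := ∀ (sigma : Int) (k : Int) (n : Int) (forbidden : Option (List (List Int))) (mod : Int), Dom_count_sequences_matrix sigma k n forbidden mod → Pre_count_sequences_matrix sigma k n forbidden mod → Spec_count_sequences_matrix sigma k n forbidden mod (count_sequences_matrix sigma k n forbidden mod)

-- ===== LEMMAS AND PROOFS =====

-- Python `%` is a function of the residue class: congruent arguments give equal remainders.
theorem pvmod_modeq (a m : Int) : PySem.Int.mod a m ≡ a [ZMOD m] := by
  have h := PySem.Int.floordiv_mul_add_mod a m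
  exact Int.modEq_iff_dvd.mpr ⟨PySem.Int.floordiv a m, by linarith [h]⟩

theorem pvmod_congr {a b : Int} (m : Int) (h : a ≡ b [ZMOD m]) :
    PySem.Int.mod a m = PySem.Int.mod b m := by
  rcases eq_or_ne m 0 with hm | hm
  · subst hm
    have : a = b := by simpa [Int.ModEq, Int.emod_zero] using h
    rw [this]
  · have hmod : PySem.Int.mod a m ≡ PySem.Int.mod b m [ZMOD m] :=
      ((pvmod_modeq a m).trans h).trans (pvmod_modeq b m).symm
    have hd : |m| ∣ PySem.Int.mod b m - PySem.Int.mod a m :=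
      (abs_dvd _ _).mpr (Int.modEq_iff_dvd.mp hmod)
    have hbounds : |PySem.Int.mod b m - PySem.Int.mod a m| < |m| := by
      rcases lt_or_gt_of_ne hm with hneg | hpos
      · have h1 := PySem.Int.mod_neg_bounds a hneg
        have h2 := PySem.Int.mod_neg_bounds b hneg
        rw [abs_of_neg hneg]; rw [abs_lt]; omega
      · have h1 := PySem.Int.mod_nonneg a hpos
        have h2 := PySem.Int.mod_lt a hpos
        have h3 := PySem.Int.mod_nonneg b hpos
        have h4 := PySem.Int.mod_lt b hpos
        rw [abs_of_pos hpos]; rw [abs_lt]; omega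
    have := Int.eq_zero_of_abs_lt_dvd hd hbounds
    omega

-- Casting to ZMod |mod| forgets a Python `%`; equal casts give equal Python remainders.
theorem pv_castR_mod (m x : Int) :
    ((PySem.Int.mod x m : Int) : ZMod m.natAbs) = (x : ZMod m.natAbs) := by
  refine (ZMod.intCast_eq_intCast_iff _ _ _).mpr ?_
  refine Int.modEq_iff_dvd.mpr ?_
  exact Int.natAbs_dvd.mpr (Int.modEq_iff_dvd.mp (pvmod_modeq x m))

theorem pv_mod_eq_of_castR {m x y : Int} (h : (x : ZMod m.natAbs) = (y : ZMod m.natAbs)) :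
    PySem.Int.mod x m = PySem.Int.mod y m := by
  apply pvmod_congr
  have := (ZMod.intCast_eq_intCast_iff _ _ _).mp h
  exact Int.modEq_iff_dvd.mpr (Int.natAbs_dvd.mp (Int.modEq_iff_dvd.mp this))

theorem pvmod_add_fold (m : Int) (xs : List Int) (y : Int) :
    xs.foldl (fun t x => PySem.Int.mod (t + x) m) (PySem.Int.mod y m)
      = PySem.Int.mod (y + xs.sum) m := by
  induction xs generalizing y with
  | nil => simp
  | cons x xs ih =>
    simp only [List.foldl_cons, List.sum_cons]
    rw [pvmod_congr m (Int.ModEq.add_right x (pvmod_modeq y m)), ih, add_assoc]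

theorem pvmod_fold_ne_nil (m : Int) (xs : List Int) (h : xs ≠ []) :
    xs.foldl (fun t x => PySem.Int.mod (t + x) m) 0 = PySem.Int.mod xs.sum m := by
  rcases xs with _ | ⟨x, xs⟩
  · exact absurd rfl h
  · simp only [List.foldl_cons, List.sum_cons]
    rw [zero_add]
    exact pvmod_add_fold m xs x

theorem pv_map_getD_range {α : Type} (d : α) (l : List α) :
    (List.range l.length).map (fun j => l.getD j d) = l := by
  apply List.ext_getElem
  · simp
  · intro i h1 h2
    simp [List.getD_eq_getElem?_getD, List.getElem?_eq_getElem h2]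

theorem pv_list_fin (n : Nat) (f : Nat → Int) :
    ((List.range n).map f).sum = ∑ j ∈ Finset.range n, f j := rfl

theorem pv_rowsum_getD (row : List Int) {N : Nat} (h : row.length = N) :
    ∑ j ∈ Finset.range N, row.getD j 0 = row.sum := by
  rw [← pv_list_fin, ← h, pv_map_getD_range]

theorem pv_getD_mem {α : Type} (l : List α) (d : α) (i : Nat) (h : i < l.length) :
    l.getD i d = l[i] := by
  rw [List.getD_eq_getElem?_getD, List.getElem?_eq_getElem h]
  rfl

theorem pv_getD_map_range {α : Type} (f : Nat → α) (d : α) {N i : Nat} (h : i < N) :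
    ((List.range N).map f).getD i d = f i := by
  have hi : i < ((List.range N).map f).length := by simpa using h
  rw [pv_getD_mem _ d i hi]
  simp

theorem pvDigits_spec (sigma : Int) (hs : 1 ≤ sigma) (k : Nat) (s : Int) :
    (pvDigits sigma k s).length = k ∧ ∀ d ∈ pvDigits sigma k s, 0 ≤ d ∧ d < sigma := by
  suffices h : ∀ (kk : Nat) (s : Int),
      (((List.range kk).foldl
        (fun (p : List Int × Int) _ => (p.1 ++ [PySem.Int.mod p.2 sigma], PySem.Int.floordiv p.2 sigma))
        ([], s)).1).length = kk ∧
      ∀ d ∈ ((List.range kk).foldl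
        (fun (p : List Int × Int) _ => (p.1 ++ [PySem.Int.mod p.2 sigma], PySem.Int.floordiv p.2 sigma))
        ([], s)).1, 0 ≤ d ∧ d < sigma by
    unfold pvDigits
    refine ⟨by simpa using (h k s).1, fun d hd => (h k s).2 d (List.mem_reverse.mp hd)⟩
  intro kk
  induction kk with
  | zero => intro s; simp
  | succ kk ih =>
    intro s
    rw [List.range_succ, List.foldl_append]
    simp only [List.foldl_cons, List.foldl_nil]
    constructor
    · simp [(ih s).1]
    · intro d hd
      rcases List.mem_append.mp hd with h | h
      · exact (ih s).2 d h
      · simp only [List.mem_singleton] at h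
        subst h
        exact ⟨PySem.Int.mod_nonneg _ (by omega), PySem.Int.mod_lt _ (by omega)⟩

theorem pv_horner_bound (sigma : Int) (hs : 1 ≤ sigma) :
    ∀ (ds : List Int), (∀ d ∈ ds, 0 ≤ d ∧ d < sigma) →
    0 ≤ ds.foldl (fun t d => t * sigma + d) 0 ∧
      ds.foldl (fun t d => t * sigma + d) 0 ≤ sigma ^ ds.length - 1 := by
  suffices h : ∀ (ds : List Int) (acc B : Int), (∀ d ∈ ds, 0 ≤ d ∧ d < sigma) → 0 ≤ acc →
      acc ≤ B - 1 →
      0 ≤ ds.foldl (fun t d => t * sigma + d) acc ∧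
        ds.foldl (fun t d => t * sigma + d) acc ≤ B * sigma ^ ds.length - 1 by
    intro ds hds
    simpa using h ds 0 1 hds le_rfl (by omega)
  intro ds
  induction ds with
  | nil => intro acc B _ h0 hB; simpa using ⟨h0, by omega⟩
  | cons d ds ih =>
    intro acc B hds h0 hB
    simp only [List.foldl_cons, List.length_cons]
    have hd := hds d (by simp)
    have h0' : 0 ≤ acc * sigma + d := by nlinarith [hd.1]
    have hB' : acc * sigma + d ≤ B * sigma - 1 := by nlinarith [hd.2]
    have hrec := ih (acc * sigma + d) (B * sigma) (fun x hx => hds x (by simp [hx])) h0' (by omega)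
    refine ⟨hrec.1, ?_⟩
    calc ds.foldl (fun t d => t * sigma + d) (acc * sigma + d)
        ≤ B * sigma * sigma ^ ds.length - 1 := hrec.2
      _ = B * sigma ^ (ds.length + 1) - 1 := by ring

-- dimension invariants
def pvDims (X : List (List Int)) (N : Nat) : Prop :=
  X.length = N ∧ ∀ r ∈ X, r.length = N

def pvWf (rows : List (PySem.Dict Int Int)) (N : Nat) : Prop :=
  rows.length = N ∧ ∀ row ∈ rows, row.keys.Nodup ∧ ∀ t ∈ row.keys, 0 ≤ t ∧ t < (N : Int)

-- interpretations into ZMod |mod| matrices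
def pvIA (m : Int) (N : Nat) (X : List (List Int)) : Matrix (Fin N) (Fin N) (ZMod m.natAbs) :=
  fun i j => (((X.getD i []).getD j 0 : Int) : ZMod m.natAbs)

def pvIB (m : Int) (N : Nat) (rows : List (PySem.Dict Int Int)) :
    Matrix (Fin N) (Fin N) (ZMod m.natAbs) :=
  fun i j => (((rows.getD i PySem.Dict.empty).getD (j : Int) 0 : Int) : ZMod m.natAbs)

theorem pv_list_fin' {α : Type} [AddCommMonoid α] (n : Nat) (f : Nat → α) :
    ((List.range n).map f).sum = ∑ j ∈ Finset.range n, f j := rfl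

theorem pv_getD_map {α β : Type} (l : List α) (f : α → β) (d : α) (d' : β) {i : Nat}
    (h : i < l.length) : (l.map f).getD i d' = f (l.getD i d) := by
  have hi : i < (l.map f).length := by simpa using h
  rw [pv_getD_mem _ d' i hi, pv_getD_mem _ d i h]
  simp

theorem pv_matmul_interp (m : Int) {N : Nat} (hN : 1 ≤ N) {X Y : List (List Int)}
    (hX : pvDims X N) (hY : pvDims Y N) :
    pvDims (pvMatMul X Y m) N ∧ pvIA m N (pvMatMul X Y m) = pvIA m N X * pvIA m N Y := by
  obtain ⟨hXl, hXrows⟩ := hX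
  obtain ⟨hYl, hYrows⟩ := hY
  have hm' : (Y.getD 0 []).length = N := by
    have h0 : 0 < Y.length := by omega
    rw [pv_getD_mem Y [] 0 h0]
    exact hYrows _ (List.getElem_mem h0)
  have hmm : pvMatMul X Y m = (List.range N).map (fun i =>
      (List.range N).map (fun j =>
        PySem.Int.mod ((List.range N).foldl
          (fun s l => s + ((X.getD i []).getD l 0) * ((Y.getD l []).getD j 0)) 0) m)) := by
    simp only [pvMatMul, hXl, hYl, hm']
  constructor
  · rw [hmm]
    refine ⟨by simp, ?_⟩
    intro r hr
    obtain ⟨i, _, rfl⟩ := List.mem_map.mp hr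
    simp
  · funext i j
    simp only [pvIA, Matrix.mul_apply, hmm]
    rw [pv_getD_map_range _ _ i.isLt, pv_getD_map_range _ _ j.isLt]
    rw [pv_castR_mod]
    rw [PySem.List.foldl_add (List.range N)
      (fun l => ((X.getD i []).getD l 0) * ((Y.getD l []).getD j 0)) 0, zero_add, pv_list_fin]
    rw [Fin.sum_univ_eq_sum_range
      (fun l => (((X.getD i []).getD l 0 : Int) : ZMod m.natAbs)
        * (((Y.getD l []).getD j 0 : Int) : ZMod m.natAbs)) N]
    push_cast
    rfl

theorem pv_identity_interp (m : Int) (N : Nat) :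
    pvDims (pvIdentity N) N ∧ pvIA m N (pvIdentity N) = 1 := by
  constructor
  · refine ⟨by simp [pvIdentity], ?_⟩
    intro r hr
    obtain ⟨i, _, rfl⟩ := List.mem_map.mp hr
    simp
  · funext i j
    simp only [pvIA, pvIdentity]
    rw [pv_getD_map_range _ _ i.isLt, pv_getD_map_range _ _ j.isLt, Matrix.one_apply]
    by_cases h : (i : Nat) = (j : Nat)
    · rw [if_pos h, if_pos (Fin.ext h)]
      simp
    · rw [if_neg h, if_neg (fun hc => h (congrArg Fin.val hc))]
      simp

theorem pv_powgo_interp (m : Int) {N : Nat} (hN : 1 ≤ N) :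
    ∀ (p : Nat) (res M : List (List Int)), pvDims res N → pvDims M N →
    pvDims (pvMatPowGo res M m p) N ∧
      pvIA m N (pvMatPowGo res M m p) = pvIA m N res * (pvIA m N M) ^ p := by
  intro p
  induction p using Nat.strong_induction_on with
  | _ p ih =>
    intro res M hres hM
    rw [pvMatPowGo]
    by_cases hp : p = 0
    · subst hp
      rw [if_pos rfl]
      exact ⟨hres, by simp⟩
    · rw [if_neg hp]
      have hres' : pvDims (if p % 2 = 1 then pvMatMul res M m else res) N ∧
          pvIA m N (if p % 2 = 1 then pvMatMul res M m else res)
            = pvIA m N res * (pvIA m N M) ^ (p % 2) := by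
        rcases Nat.mod_two_eq_zero_or_one p with h2 | h2 <;> rw [h2]
        · rw [if_neg (by norm_num), pow_zero, mul_one]
          exact ⟨hres, rfl⟩
        · rw [if_pos rfl, pow_one]
          exact pv_matmul_interp m hN hres hM
      have hMM := pv_matmul_interp m hN hM hM
      have hrec := ih (p / 2) (Nat.div_lt_self (Nat.pos_of_ne_zero hp) one_lt_two)
        _ _ hres'.1 hMM.1
      refine ⟨hrec.1, ?_⟩
      rw [hrec.2, hres'.2, hMM.2]
      rw [mul_assoc]
      congr 1
      have : (pvIA m N M * pvIA m N M) ^ (p / 2) = (pvIA m N M) ^ (2 * (p / 2)) := by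
        rw [pow_mul, pow_two]
      rw [this, ← pow_add]
      congr 1
      omega

theorem pv_total_fold (m : Int) (Mp : List (List Int)) (N : Nat) (hN : 1 ≤ N)
    (hG : pvDims Mp N) :
    (List.range N).foldl (fun total i =>
      (List.range N).foldl (fun total j =>
        PySem.Int.mod (total + (Mp.getD i []).getD j 0) m) total) 0
    = PySem.Int.mod Mp.flatten.sum m := by
  have hrowmem : ∀ i, i < N → (Mp.getD i []) ∈ Mp := by
    intro i hi
    have hilen : i < Mp.length := by rw [hG.1]; exact hi
    rw [pv_getD_mem Mp [] i hilen]
    exact List.getElem_mem hilen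
  have hstep : ∀ (acc : Int), ∀ i ∈ List.range N,
      (List.range N).foldl (fun t j => PySem.Int.mod (t + (Mp.getD i []).getD j 0) m) acc
        = (Mp.getD i []).foldl (fun t x => PySem.Int.mod (t + x) m) acc := by
    intro acc i hi
    have hiN : i < N := List.mem_range.mp hi
    have hlen : (Mp.getD i []).length = N := hG.2 _ (hrowmem i hiN)
    conv_rhs => rw [← pv_map_getD_range (0:Int) (Mp.getD i []), List.foldl_map]
    rw [hlen]
  rw [PySem.List.foldl_congr_mem _ _ _ _ hstep]
  have houter : (List.range N).foldl
      (fun acc i => (Mp.getD i []).foldl (fun t x => PySem.Int.mod (t + x) m) acc) 0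
      = Mp.foldl (fun acc r => r.foldl (fun t x => PySem.Int.mod (t + x) m) acc) 0 := by
    conv_rhs => rw [← pv_map_getD_range ([] : List Int) Mp, List.foldl_map]
    rw [hG.1]
  rw [houter, ← List.foldl_flatten]
  have hflat : Mp.flatten ≠ [] := by
    rcases Mp with _ | ⟨r, rest⟩
    · have := hG.1
      simp at this
      omega
    · have hr : r ∈ r :: rest := by simp
      have hrlen : r.length = N := hG.2 r hr
      rcases r with _ | ⟨x, xs⟩
      · simp at hrlen; omega
      · simp
  exact pvmod_fold_ne_nil m _ hflat

theorem pv_flatten_cast (m : Int) {N : Nat} {X : List (List Int)} (hX : pvDims X N) :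
    ((X.flatten.sum : Int) : ZMod m.natAbs) = ∑ i : Fin N, ∑ j : Fin N, pvIA m N X i j := by
  rw [List.sum_flatten, Int.cast_list_sum, List.map_map]
  have hXeq : List.map (Int.cast ∘ List.sum) X
      = (List.range N).map (fun i => (((X.getD i []).sum : Int) : ZMod m.natAbs)) := by
    conv_lhs => rw [← pv_map_getD_range ([] : List Int) X, List.map_map]
    rw [hX.1]
    rfl
  rw [hXeq, pv_list_fin']
  simp only [pvIA]
  rw [Fin.sum_univ_eq_sum_range
    (fun i => ∑ j : Fin N, (((X.getD i []).getD (j : Nat) 0 : Int) : ZMod m.natAbs)) N]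
  refine Finset.sum_congr rfl (fun i hi => ?_)
  have hiN : i < N := Finset.mem_range.mp hi
  have hrow : (X.getD i []) ∈ X := by
    have hilen : i < X.length := by rw [hX.1]; exact hiN
    rw [pv_getD_mem X [] i hilen]
    exact List.getElem_mem hilen
  have hlen : (X.getD i []).length = N := hX.2 _ hrow
  rw [Fin.sum_univ_eq_sum_range
    (fun j => (((X.getD i []).getD j 0 : Int) : ZMod m.natAbs)) N]
  rw [← pv_rowsum_getD _ hlen]
  push_cast
  rfl

-- accumulation dict: getD after a (key, pymod-add) insertion fold
theorem pv_acc_getD (m : Int) (g : Int × Int → Int) :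
    ∀ (L : List (Int × Int)) (acc : PySem.Dict Int Int) (u : Int),
    (((L.foldl (fun a p => a.insert p.1 (PySem.Int.mod (a.getD p.1 0 + g p) m)) acc).getD u 0 : Int)
        : ZMod m.natAbs)
      = ((acc.getD u 0 : Int) : ZMod m.natAbs)
        + ((L.filter (fun p => p.1 == u)).map (fun p => ((g p : Int) : ZMod m.natAbs))).sum := by
  intro L
  induction L with
  | nil => intro acc u; simp
  | cons p L ih =>
    intro acc u
    simp only [List.foldl_cons, List.filter_cons]
    rw [ih]
    have hins : (((acc.insert p.1 (PySem.Int.mod (acc.getD p.1 0 + g p) m)).getD u 0 : Int)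
        : ZMod m.natAbs)
        = ((acc.getD u 0 : Int) : ZMod m.natAbs)
          + (if p.1 == u then ((g p : Int) : ZMod m.natAbs) else 0) := by
      rw [PySem.Dict.getD_insert]
      by_cases h : u = p.1
      · rw [if_pos h, if_pos (by simp [h]), pv_castR_mod, h]
        push_cast
        ring
      · rw [if_neg h, if_neg (by simpa using fun hc => h hc.symm)]
        ring
    rw [hins]
    by_cases h : (p.1 == u) = true
    · rw [if_pos h, if_pos h]
      simp only [List.map_cons, List.sum_cons]
      ring
    · rw [if_neg h, if_neg h]
      ring

-- with unique keys, the filtered item sum at u is the lookup at u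
theorem pv_filter_getD (m : Int) (d : PySem.Dict Int Int) (u : Int) (hnd : d.keys.Nodup) :
    ((d.items.filter (fun p => p.1 == u)).map (fun p => ((p.2 : Int) : ZMod m.natAbs))).sum
      = ((d.getD u 0 : Int) : ZMod m.natAbs) := by
  rcases d with ⟨L⟩
  simp only [PySem.Dict.keys] at hnd
  induction L with
  | nil => simp [PySem.Dict.getD, PySem.Dict.get?]
  | cons p L ih =>
    obtain ⟨pk, pv⟩ := p
    have hnd' : (L.map (fun p => p.1)).Nodup := (List.nodup_cons.mp (by simpa using hnd)).2
    have hp1 : pk ∉ L.map (fun p => p.1) := (List.nodup_cons.mp (by simpa using hnd)).1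
    simp only [List.filter_cons]
    have hgetD : (PySem.Dict.mk ((pk, pv) :: L)).getD u 0
        = if pk == u then pv else (PySem.Dict.mk L).getD u 0 := by
      simp only [PySem.Dict.getD, PySem.Dict.get?_mk_cons]
      by_cases h : (pk == u) = true
      · rw [if_pos h, if_pos h]
        rfl
      · rw [if_neg h, if_neg h]
    by_cases h : ((pk, pv).1 == u) = true
    · simp only at h
      rw [if_pos h] at hgetD
      rw [if_pos h, hgetD]
      simp only [List.map_cons, List.sum_cons]
      have hnone : L.filter (fun q => q.1 == u) = [] := by
        rw [List.filter_eq_nil_iff]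
        intro q hq hq'
        apply hp1
        have h1 : q.1 = u := by simpa using hq'
        have h2 : pk = u := by simpa using h
        rw [h2, ← h1]
        exact List.mem_map.mpr ⟨q, hq, rfl⟩
      rw [hnone]
      simp
    · simp only at h
      rw [if_neg h] at hgetD
      rw [if_neg h, hgetD]
      exact ih hnd'

-- with unique in-range keys, an item sum is a sum over the full index range
theorem pv_items_range_sum (m : Int) {N : Nat} (d : PySem.Dict Int Int) (h : Int → ZMod m.natAbs)
    (hnd : d.keys.Nodup) (hb : ∀ t ∈ d.keys, 0 ≤ t ∧ t < (N : Int)) :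
    (d.items.map (fun p => ((p.2 : Int) : ZMod m.natAbs) * h p.1)).sum
      = ∑ t ∈ Finset.range N, ((d.getD (t : Int) 0 : Int) : ZMod m.natAbs) * h (t : Int) := by
  rcases d with ⟨L⟩
  simp only [PySem.Dict.keys] at *
  induction L with
  | nil =>
    simp [PySem.Dict.getD, PySem.Dict.get?]
  | cons p L ih =>
    obtain ⟨pk, pv⟩ := p
    have hnd' : (L.map (fun p => p.1)).Nodup := (List.nodup_cons.mp (by simpa using hnd)).2
    have hp1 : pk ∉ L.map (fun p => p.1) := (List.nodup_cons.mp (by simpa using hnd)).1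
    have hb' : ∀ t ∈ L.map (fun p => p.1), 0 ≤ t ∧ t < (N : Int) := by
      intro t ht; exact hb t (by simp_all)
    have hpb : 0 ≤ pk ∧ pk < (N : Int) := hb pk (by simp)
    set t0 := pk.toNat with ht0_def
    have ht0 : ((t0 : Nat) : Int) = pk := Int.toNat_of_nonneg hpb.1
    have ht0N : t0 < N := by omega
    have hgetD : ∀ u : Int, (PySem.Dict.mk ((pk, pv) :: L)).getD u 0
        = if pk == u then pv else (PySem.Dict.mk L).getD u 0 := by
      intro u
      simp only [PySem.Dict.getD, PySem.Dict.get?_mk_cons]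
      by_cases h' : (pk == u) = true
      · rw [if_pos h', if_pos h']
        rfl
      · rw [if_neg h', if_neg h']
    have hLp1 : (PySem.Dict.mk L).getD pk 0 = 0 := by
      apply PySem.Dict.getD_of_not_contains
      rw [← Bool.not_eq_true, PySem.Dict.contains_iff_mem_keys]
      simpa [PySem.Dict.keys] using hp1
    simp only [List.map_cons, List.sum_cons]
    rw [ih hnd' hb']
    have hsplit : ∀ t ∈ Finset.range N,
        (((PySem.Dict.mk ((pk, pv) :: L)).getD (t : Int) 0 : Int) : ZMod m.natAbs) * h (t : Int)
        = (((PySem.Dict.mk L).getD (t : Int) 0 : Int) : ZMod m.natAbs) * h (t : Int)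
          + (if t = t0 then ((pv : Int) : ZMod m.natAbs) * h (t : Int) else 0) := by
      intro t ht
      rw [hgetD]
      by_cases heq : t = t0
      · subst heq
        rw [if_pos (by simp [ht0]), if_pos rfl, ht0, hLp1]
        push_cast
        ring
      · have hne : ¬ ((pk == (t : Int)) = true) := by
          simp only [beq_iff_eq]
          intro hc
          apply heq
          omega
        rw [if_neg hne, if_neg heq]
        ring
    rw [Finset.sum_congr rfl hsplit, Finset.sum_add_distrib]
    rw [Finset.sum_ite_eq' (Finset.range N) t0
      (fun t => ((pv : Int) : ZMod m.natAbs) * h (t : Int))]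
    rw [if_pos (Finset.mem_range.mpr ht0N), ht0]
    ring

theorem pv_compose_interp (m : Int) {N : Nat} {X Y : List (PySem.Dict Int Int)}
    (hX : pvWf X N) (hY : pvWf Y N) :
    pvWf (pvCompose m X Y) N ∧ pvIB m N (pvCompose m X Y) = pvIB m N X * pvIB m N Y := by
  obtain ⟨hXl, hXrows⟩ := hX
  obtain ⟨hYl, hYrows⟩ := hY
  have hYget : ∀ t : Nat, (Y.getD t PySem.Dict.empty).keys.Nodup ∧
      ∀ w ∈ (Y.getD t PySem.Dict.empty).keys, 0 ≤ w ∧ w < (N : Int) := by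
    intro t
    by_cases ht : t < Y.length
    · rw [pv_getD_mem Y _ t ht]
      exact hYrows _ (List.getElem_mem ht)
    · rw [List.getD_eq_getElem?_getD, List.getElem?_eq_none (by omega)]
      exact ⟨PySem.Dict.nodup_keys_empty, by simp [PySem.Dict.keys, PySem.Dict.empty]⟩
  -- value of one composed row entry
  have hrowval : ∀ (L : List (Int × Int)) (acc : PySem.Dict Int Int) (u : Int),
      (((L.foldl (fun acc tw =>
          (Y.getD tw.1.toNat PySem.Dict.empty).items.foldl (fun acc uw =>
            acc.insert uw.1 (PySem.Int.mod (acc.getD uw.1 0 + tw.2 * uw.2) m)) acc)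
          acc).getD u 0 : Int) : ZMod m.natAbs)
        = ((acc.getD u 0 : Int) : ZMod m.natAbs)
          + (L.map (fun tw => ((tw.2 : Int) : ZMod m.natAbs)
              * (((Y.getD tw.1.toNat PySem.Dict.empty).getD u 0 : Int) : ZMod m.natAbs))).sum := by
    intro L
    induction L with
    | nil => intro acc u; simp
    | cons tw L ih =>
      intro acc u
      simp only [List.foldl_cons, List.map_cons, List.sum_cons]
      rw [ih]
      have hstep := pv_acc_getD m (fun uw => tw.2 * uw.2)
        (Y.getD tw.1.toNat PySem.Dict.empty).items acc u
      rw [hstep]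
      have hfil : (((Y.getD tw.1.toNat PySem.Dict.empty).items.filter (fun p => p.1 == u)).map
            (fun p => ((tw.2 * p.2 : Int) : ZMod m.natAbs))).sum
          = ((tw.2 : Int) : ZMod m.natAbs)
            * (((Y.getD tw.1.toNat PySem.Dict.empty).getD u 0 : Int) : ZMod m.natAbs) := by
        have h1 : (fun (p : Int × Int) => ((tw.2 * p.2 : Int) : ZMod m.natAbs))
            = fun p => ((tw.2 : Int) : ZMod m.natAbs) * ((p.2 : Int) : ZMod m.natAbs) := by
          funext p
          push_cast
          ring
        rw [h1, List.sum_map_mul_left, pv_filter_getD m _ u (hYget _).1]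
      rw [hfil]
      ring
  -- keys of one composed row
  have hrowkeys : ∀ (L : List (Int × Int)) (acc : PySem.Dict Int Int),
      acc.keys.Nodup → (∀ w ∈ acc.keys, 0 ≤ w ∧ w < (N : Int)) →
      (L.foldl (fun acc tw =>
          (Y.getD tw.1.toNat PySem.Dict.empty).items.foldl (fun acc uw =>
            acc.insert uw.1 (PySem.Int.mod (acc.getD uw.1 0 + tw.2 * uw.2) m)) acc)
          acc).keys.Nodup ∧
      ∀ w ∈ (L.foldl (fun acc tw =>
          (Y.getD tw.1.toNat PySem.Dict.empty).items.foldl (fun acc uw =>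
            acc.insert uw.1 (PySem.Int.mod (acc.getD uw.1 0 + tw.2 * uw.2) m)) acc)
          acc).keys, 0 ≤ w ∧ w < (N : Int) := by
    intro L
    induction L with
    | nil => intro acc h1 h2; exact ⟨h1, h2⟩
    | cons tw L ih =>
      intro acc h1 h2
      simp only [List.foldl_cons]
      apply ih
      · exact PySem.Dict.nodup_keys_foldl_insert_key
          (Y.getD tw.1.toNat PySem.Dict.empty).items (fun uw => uw.1)
          (fun d uw => PySem.Int.mod (d.getD uw.1 0 + tw.2 * uw.2) m) acc h1
      · intro w hw
        rw [PySem.Dict.keys_foldl_insert_key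
          (Y.getD tw.1.toNat PySem.Dict.empty).items (fun uw => uw.1)
          (fun d uw => PySem.Int.mod (d.getD uw.1 0 + tw.2 * uw.2) m) acc] at hw
        rcases (PySem.Set.mem_update _ _ _).mp hw with h | h
        · exact h2 w h
        · refine (hYget tw.1.toNat).2 w ?_
          simpa [PySem.Dict.keys] using h
  constructor
  · refine ⟨by simp [pvCompose, hXl], ?_⟩
    intro row hrow
    simp only [pvCompose] at hrow
    obtain ⟨r0, _, rfl⟩ := List.mem_map.mp hrow
    exact hrowkeys r0.items PySem.Dict.empty PySem.Dict.nodup_keys_empty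
      (by simp [PySem.Dict.keys, PySem.Dict.empty])
  · funext i j
    have hiX : (i : Nat) < X.length := by rw [hXl]; exact i.isLt
    have hentry : (pvCompose m X Y).getD i PySem.Dict.empty
        = (X.getD (i : Nat) PySem.Dict.empty).items.foldl (fun acc tw =>
            (Y.getD tw.1.toNat PySem.Dict.empty).items.foldl (fun acc uw =>
              acc.insert uw.1 (PySem.Int.mod (acc.getD uw.1 0 + tw.2 * uw.2) m)) acc)
            PySem.Dict.empty := by
      simp only [pvCompose]
      rw [pv_getD_map X _ PySem.Dict.empty PySem.Dict.empty hiX]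
    simp only [pvIB]
    rw [hentry, hrowval _ _ (j : Int)]
    have hmemX : X.getD (i : Nat) PySem.Dict.empty ∈ X := by
      rw [pv_getD_mem X PySem.Dict.empty _ hiX]
      exact List.getElem_mem hiX
    have hXrow := hXrows _ hmemX
    rw [pv_items_range_sum m (X.getD (i:Nat) PySem.Dict.empty)
      (fun tk => (((Y.getD tk.toNat PySem.Dict.empty).getD (j : Int) 0 : Int) : ZMod m.natAbs))
      hXrow.1 hXrow.2]
    have hzero : ((PySem.Dict.empty.getD ((j : Nat) : Int) 0 : Int) : ZMod m.natAbs) = 0 := by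
      simp [PySem.Dict.getD, PySem.Dict.get?, PySem.Dict.empty]
    rw [hzero, zero_add, Matrix.mul_apply]
    simp only [pvIB]
    rw [Fin.sum_univ_eq_sum_range (fun t =>
      (((X.getD (i : Nat) PySem.Dict.empty).getD (t : Int) 0 : Int) : ZMod m.natAbs)
        * (((Y.getD t PySem.Dict.empty).getD ((j : Nat) : Int) 0 : Int) : ZMod m.natAbs)) N]
    refine Finset.sum_congr rfl (fun t ht => ?_)
    rw [Int.toNat_natCast]

theorem pv_powB_interp (m : Int) {N : Nat} {rows : List (PySem.Dict Int Int)}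
    (hrows : pvWf rows N) :
    ∀ (p : Nat), 1 ≤ p →
    pvWf (pvMatPowB rows m p) N ∧ pvIB m N (pvMatPowB rows m p) = (pvIB m N rows) ^ p := by
  intro p
  induction p using Nat.strong_induction_on with
  | _ p ih =>
    intro hp1
    rw [pvMatPowB]
    by_cases hp : p ≤ 1
    · have : p = 1 := by omega
      subst this
      rw [if_pos (by omega)]
      exact ⟨hrows, by rw [pow_one]⟩
    · rw [if_neg hp]
      have hq := ih (p / 2) (Nat.div_lt_self (by omega) (by omega)) (by omega)
      have hsq := pv_compose_interp m hq.1 hq.1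
      have hsqpow : pvIB m N (pvCompose m (pvMatPowB rows m (p / 2)) (pvMatPowB rows m (p / 2)))
          = (pvIB m N rows) ^ (p / 2 + p / 2) := by
        rw [hsq.2, hq.2, pow_add]
      rcases Nat.mod_two_eq_zero_or_one p with h2 | h2 <;> rw [h2]
      · rw [if_neg (by norm_num)]
        refine ⟨hsq.1, ?_⟩
        rw [hsqpow]
        congr 1
        omega
      · rw [if_pos rfl]
        have hfin := pv_compose_interp m hsq.1 hrows
        refine ⟨hfin.1, ?_⟩
        rw [hfin.2, hsqpow, ← pow_succ]
        congr 1
        omega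

theorem pv_rowfold_char (sigma : Int) (ds : List Int) (tl : Int) (N : Nat)
    (fb : List (List Int)) (hs : 1 ≤ sigma) (h1 : 0 ≤ tl)
    (h2 : tl * sigma + sigma ≤ (N : Int)) :
    ∀ c0 : Nat, c0 ≤ sigma.toNat →
    ((List.range c0).foldl
      (fun row (c : Nat) => if ds ++ [(c : Int)] ∈ fb then row
        else row.set (tl * sigma + (c : Int)).toNat (1 : Int)) (List.replicate N (0 : Int))).length = N ∧
    ∀ j : Nat, j < N → ((List.range c0).foldl
      (fun row (c : Nat) => if ds ++ [(c : Int)] ∈ fb then row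
        else row.set (tl * sigma + (c : Int)).toNat (1 : Int)) (List.replicate N (0 : Int))).getD j 0 =
      if tl * sigma ≤ (j : Int) ∧ (j : Int) < tl * sigma + (c0 : Int)
          ∧ ds ++ [(j : Int) - tl * sigma] ∉ fb then 1 else 0 := by
  intro c0
  induction c0 with
  | zero =>
    intro _
    refine ⟨by simp, fun j hj => ?_⟩
    rw [if_neg (by rintro ⟨ha, hb, -⟩; omega)]
    simp only [List.range_zero, List.foldl_nil]
    simp [List.getD_eq_getElem?_getD, hj]
  | succ c0 ih =>
    intro hc0
    obtain ⟨ihlen, ihget⟩ := ih (by omega)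
    rw [List.range_succ, List.foldl_append, List.foldl_cons, List.foldl_nil]
    by_cases hfb : ds ++ [(c0 : Int)] ∈ fb
    · rw [if_pos hfb]
      refine ⟨ihlen, fun j hj => ?_⟩
      rw [ihget j hj]
      by_cases hcond : tl * sigma ≤ (j : Int) ∧ (j : Int) < tl * sigma + (c0 : Int)
          ∧ ds ++ [(j : Int) - tl * sigma] ∉ fb
      · rw [if_pos hcond, if_pos ⟨hcond.1, by push_cast; omega, hcond.2.2⟩]
      · rw [if_neg hcond]
        rw [if_neg ?_]
        rintro ⟨ha, hb, hnf⟩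
        apply hcond
        by_cases hlt : (j : Int) < tl * sigma + (c0 : Int)
        · exact ⟨ha, hlt, hnf⟩
        · exfalso
          apply hnf
          have hji : (j : Int) - tl * sigma = (c0 : Int) := by push_cast at hb ⊢; omega
          rw [hji]
          exact hfb
    · rw [if_neg hfb]
      have hσ : ((sigma.toNat : Nat) : Int) = sigma := Int.toNat_of_nonneg (by omega)
      have hb0 : 0 ≤ tl * sigma := mul_nonneg h1 (by omega)
      have hidxN : (tl * sigma + (c0 : Int)).toNat < N := by omega
      refine ⟨by rw [List.length_set, ihlen], fun j hj => ?_⟩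
      rw [List.getD_eq_getElem?_getD, List.getElem?_set]
      by_cases hj' : (tl * sigma + (c0 : Int)).toNat = j
      · rw [if_pos hj', if_pos (by rw [ihlen]; omega)]
        have hji : (j : Int) - tl * sigma = (c0 : Int) := by omega
        simp only [Option.getD_some]
        rw [if_pos ⟨by omega, by push_cast; omega, by rw [hji]; exact hfb⟩]
      · rw [if_neg hj', ← List.getD_eq_getElem?_getD, ihget j hj]
        by_cases hcond : tl * sigma ≤ (j : Int) ∧ (j : Int) < tl * sigma + (c0 : Int)
            ∧ ds ++ [(j : Int) - tl * sigma] ∉ fb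
        · rw [if_pos hcond, if_pos ⟨hcond.1, by push_cast; omega, hcond.2.2⟩]
        · rw [if_neg hcond]
          rw [if_neg ?_]
          rintro ⟨ha, hb, hnf⟩
          apply hcond
          by_cases hlt : (j : Int) < tl * sigma + (c0 : Int)
          · exact ⟨ha, hlt, hnf⟩
          · exfalso
            apply hj'
            push_cast at hb
            omega

theorem pv_dictfold_char (sigma : Int) (ds : List Int) (tl : Int) (fb : List (List Int))
    (hs : 1 ≤ sigma) :
    ∀ c0 : Nat, c0 ≤ sigma.toNat →
    ((List.range c0).foldl
      (fun row (c : Nat) => if ds ++ [(c : Int)] ∈ fb then row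
        else row.insert (tl * sigma + (c : Int)) (1 : Int)) PySem.Dict.empty).keys.Nodup ∧
    (∀ t ∈ ((List.range c0).foldl
      (fun row (c : Nat) => if ds ++ [(c : Int)] ∈ fb then row
        else row.insert (tl * sigma + (c : Int)) (1 : Int)) PySem.Dict.empty).keys,
        tl * sigma ≤ t ∧ t < tl * sigma + (c0 : Int)) ∧
    ∀ u : Int, ((List.range c0).foldl
      (fun row (c : Nat) => if ds ++ [(c : Int)] ∈ fb then row
        else row.insert (tl * sigma + (c : Int)) (1 : Int)) PySem.Dict.empty).getD u 0 =
      if tl * sigma ≤ u ∧ u < tl * sigma + (c0 : Int)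
          ∧ ds ++ [u - tl * sigma] ∉ fb then 1 else 0 := by
  intro c0
  induction c0 with
  | zero =>
    intro _
    refine ⟨PySem.Dict.nodup_keys_empty, by simp [PySem.Dict.keys, PySem.Dict.empty], fun u => ?_⟩
    rw [if_neg (by rintro ⟨ha, hb, -⟩; omega)]
    simp [PySem.Dict.getD, PySem.Dict.get?, PySem.Dict.empty]
  | succ c0 ih =>
    intro hc0
    obtain ⟨ihnd, ihkeys, ihget⟩ := ih (by omega)
    rw [List.range_succ, List.foldl_append, List.foldl_cons, List.foldl_nil]
    by_cases hfb : ds ++ [(c0 : Int)] ∈ fb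
    · rw [if_pos hfb]
      refine ⟨ihnd, fun t ht => ?_, fun u => ?_⟩
      · have := ihkeys t ht
        exact ⟨this.1, by push_cast; omega⟩
      · rw [ihget u]
        by_cases hcond : tl * sigma ≤ u ∧ u < tl * sigma + (c0 : Int)
            ∧ ds ++ [u - tl * sigma] ∉ fb
        · rw [if_pos hcond, if_pos ⟨hcond.1, by push_cast; omega, hcond.2.2⟩]
        · rw [if_neg hcond]
          rw [if_neg ?_]
          rintro ⟨ha, hb, hnf⟩
          apply hcond
          by_cases hlt : u < tl * sigma + (c0 : Int)
          · exact ⟨ha, hlt, hnf⟩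
          · exfalso
            apply hnf
            have hji : u - tl * sigma = (c0 : Int) := by push_cast at hb ⊢; omega
            rw [hji]
            exact hfb
    · rw [if_neg hfb]
      refine ⟨PySem.Dict.nodup_keys_insert _ _ _ ihnd, fun t ht => ?_, fun u => ?_⟩
      · rcases (PySem.Dict.mem_keys_insert _ _ _ _).mp ht with h | h
        · subst h
          constructor <;> push_cast <;> omega
        · have := ihkeys t h
          exact ⟨this.1, by push_cast; omega⟩
      · rw [PySem.Dict.getD_insert]
        by_cases hu : u = tl * sigma + (c0 : Int)
        · rw [if_pos hu]
          have hji : u - tl * sigma = (c0 : Int) := by omega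
          rw [if_pos ⟨by omega, by push_cast; omega, by rw [hji]; exact hfb⟩]
        · rw [if_neg hu, ihget u]
          by_cases hcond : tl * sigma ≤ u ∧ u < tl * sigma + (c0 : Int)
              ∧ ds ++ [u - tl * sigma] ∉ fb
          · rw [if_pos hcond, if_pos ⟨hcond.1, by push_cast; omega, hcond.2.2⟩]
          · rw [if_neg hcond]
            rw [if_neg ?_]
            rintro ⟨ha, hb, hnf⟩
            apply hcond
            by_cases hlt : u < tl * sigma + (c0 : Int)
            · exact ⟨ha, hlt, hnf⟩
            · exfalso
              apply hu
              push_cast at hb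
              omega

theorem pv_base_interp (sigma : Int) (k : Nat) (fb : List (List Int)) (m : Int)
    (hs : 1 ≤ sigma) (hk1 : 1 ≤ k ∨ sigma = 1) :
    pvDims ((List.range (sigma ^ k).toNat).map
        (fun (s : Nat) => pvRow sigma k (sigma ^ k).toNat fb (s : Int))) (sigma ^ k).toNat ∧
    pvWf ((List.range (sigma ^ k).toNat).map (fun (s : Nat) => pvRowB sigma k fb (s : Int)))
        (sigma ^ k).toNat ∧
    pvIA m (sigma ^ k).toNat ((List.range (sigma ^ k).toNat).map
        (fun (s : Nat) => pvRow sigma k (sigma ^ k).toNat fb (s : Int)))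
      = pvIB m (sigma ^ k).toNat ((List.range (sigma ^ k).toNat).map
        (fun (s : Nat) => pvRowB sigma k fb (s : Int))) := by
  set N := (sigma ^ k).toNat with hN_def
  have hNe : ((N : Int)) = sigma ^ k := Int.toNat_of_nonneg (le_of_lt (pow_pos (by omega) k))
  have hσcast : ((sigma.toNat : Nat) : Int) = sigma := Int.toNat_of_nonneg (by omega)
  have hper : ∀ s : Int,
      0 ≤ ((pvDigits sigma k s).drop 1).foldl (fun t d => t * sigma + d) 0 ∧
      ((pvDigits sigma k s).drop 1).foldl (fun t d => t * sigma + d) 0 * sigma + sigma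
        ≤ (N : Int) := by
    intro s
    have hds := pvDigits_spec sigma hs k s
    have hbnd := pv_horner_bound sigma hs ((pvDigits sigma k s).drop 1)
      (fun d hd => hds.2 d (List.mem_of_mem_drop hd))
    have hlen : ((pvDigits sigma k s).drop 1).length = k - 1 := by simp [hds.1]
    rw [hNe]
    rcases hk1 with hk' | hk'
    · have hpow : sigma ^ (k - 1) * sigma = sigma ^ k := by
        rw [← pow_succ]
        congr 1
        omega
      refine ⟨hbnd.1, ?_⟩
      have h2 := hbnd.2
      rw [hlen] at h2
      nlinarith [h2, hs, hpow]
    · subst hk'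
      refine ⟨hbnd.1, ?_⟩
      have h2 := hbnd.2
      have h1 := hbnd.1
      simp only [one_pow] at h2 ⊢
      omega
  have hpy : PySem.List.pyRange 0 sigma 1
      = (List.range sigma.toNat).map (fun (i : Nat) => (i : Int)) := by
    rw [PySem.List.pyRange_one]
    simp only [sub_zero, zero_add]
  have hbridgeA : ∀ s : Int, pvRow sigma k N fb s
      = (List.range sigma.toNat).foldl
          (fun row (c : Nat) => if pvDigits sigma k s ++ [(c : Int)] ∈ fb then row
            else row.set ((((pvDigits sigma k s).drop 1).foldl (fun t d => t * sigma + d) 0)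
              * sigma + (c : Int)).toNat 1)
          (List.replicate N 0) := by
    intro s
    simp only [pvRow]
    rw [hpy, List.foldl_map]
  have hbridgeB : ∀ s : Int, pvRowB sigma k fb s
      = (List.range sigma.toNat).foldl
          (fun row (c : Nat) => if pvDigits sigma k s ++ [(c : Int)] ∈ fb then row
            else row.insert ((((pvDigits sigma k s).drop 1).foldl (fun t d => t * sigma + d) 0)
              * sigma + (c : Int)) 1)
          PySem.Dict.empty := by
    intro s
    simp only [pvRowB]
    rw [hpy, List.foldl_map]
  have hcharA := fun s : Int => pv_rowfold_char sigma (pvDigits sigma k s)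
    (((pvDigits sigma k s).drop 1).foldl (fun t d => t * sigma + d) 0) N fb hs
    (hper s).1 (hper s).2 sigma.toNat le_rfl
  have hcharB := fun s : Int => pv_dictfold_char sigma (pvDigits sigma k s)
    (((pvDigits sigma k s).drop 1).foldl (fun t d => t * sigma + d) 0) fb hs
    sigma.toNat le_rfl
  refine ⟨⟨by simp, ?_⟩, ⟨by simp, ?_⟩, ?_⟩
  · intro r hr
    obtain ⟨s, _, rfl⟩ := List.mem_map.mp hr
    rw [hbridgeA]
    exact (hcharA _).1
  · intro row hrow
    obtain ⟨s, _, rfl⟩ := List.mem_map.mp hrow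
    rw [hbridgeB]
    obtain ⟨hnd, hkeys, -⟩ := hcharB (s : Int)
    refine ⟨hnd, fun t ht => ?_⟩
    have hw := hkeys t ht
    have hp := hper (s : Int)
    have hb0 : 0 ≤ (((pvDigits sigma k (s : Int)).drop 1).foldl (fun t d => t * sigma + d) 0)
        * sigma := mul_nonneg hp.1 (by omega)
    constructor
    · omega
    · have := hp.2
      omega
  · funext i j
    simp only [pvIA, pvIB]
    rw [pv_getD_map_range (fun (s : Nat) => pvRow sigma k N fb (s : Int)) [] i.isLt]
    rw [pv_getD_map_range (fun (s : Nat) => pvRowB sigma k fb (s : Int)) PySem.Dict.empty i.isLt]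
    rw [hbridgeA, hbridgeB]
    rw [(hcharA ((i : Nat) : Int)).2 (j : Nat) j.isLt]
    rw [(hcharB ((i : Nat) : Int)).2.2 ((j : Nat) : Int)]

theorem pv_B_sum_cast (m : Int) {N : Nat} {F : List (PySem.Dict Int Int)} (hF : pvWf F N) :
    (((F.map (fun row => row.values.sum)).sum : Int) : ZMod m.natAbs)
      = ∑ i : Fin N, ∑ j : Fin N, pvIB m N F i j := by
  rw [Int.cast_list_sum, List.map_map]
  have hFeq : List.map (Int.cast ∘ fun row => row.values.sum) F
      = (List.range N).map (fun i =>
          (((F.getD i PySem.Dict.empty).values.sum : Int) : ZMod m.natAbs)) := by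
    conv_lhs => rw [← pv_map_getD_range PySem.Dict.empty F, List.map_map]
    rw [hF.1]
    rfl
  rw [hFeq, pv_list_fin']
  simp only [pvIB]
  rw [Fin.sum_univ_eq_sum_range (fun i => ∑ j : Fin N,
    (((F.getD i PySem.Dict.empty).getD ((j : Nat) : Int) 0 : Int) : ZMod m.natAbs)) N]
  refine Finset.sum_congr rfl (fun i hi => ?_)
  have hiN : i < N := Finset.mem_range.mp hi
  have hiF : i < F.length := by rw [hF.1]; exact hiN
  have hmemF : F.getD i PySem.Dict.empty ∈ F := by
    rw [pv_getD_mem F PySem.Dict.empty i hiF]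
    exact List.getElem_mem hiF
  have hrow := hF.2 _ hmemF
  rw [Fin.sum_univ_eq_sum_range (fun j =>
    (((F.getD i PySem.Dict.empty).getD ((j : Nat) : Int) 0 : Int) : ZMod m.natAbs)) N]
  have hvals : (F.getD i PySem.Dict.empty).values.sum
      = ((F.getD i PySem.Dict.empty).items.map (fun p => p.2)).sum := by
    simp [PySem.Dict.values]
  rw [hvals, Int.cast_list_sum, List.map_map]
  have := pv_items_range_sum m (F.getD i PySem.Dict.empty) (fun _ => 1) hrow.1 hrow.2
  simp only [mul_one] at this
  rw [← this]
  rfl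

theorem pv_identity_flat_sum (N : Nat) : (pvIdentity N).flatten.sum = (N : Int) := by
  rw [List.sum_flatten]
  have : (pvIdentity N).map List.sum = (List.range N).map (fun _ => (1 : Int)) := by
    simp only [pvIdentity, List.map_map]
    refine List.map_congr_left (fun i hi => ?_)
    have hiN : i < N := List.mem_range.mp hi
    simp only [Function.comp]
    rw [pv_list_fin, Finset.sum_ite_eq, if_pos (Finset.mem_range.mpr hiN)]
  rw [this, List.map_const', List.sum_replicate, nsmul_eq_mul, mul_one]
  simp

-- ===== VERDICT (by name: the statement is the Claim_ definition above) =====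
theorem count_sequences_matrix_spec : Claim_equal_count_sequences_matrix := by
  intro sigma k n forbidden m _ hpre
  obtain ⟨hs, hk, hn, hm, hk1⟩ := hpre
  unfold Spec_count_sequences_matrix
  by_cases hnk : n < k
  · simp only [count_sequences_matrix, count_sequences_matrix_alt, if_pos hnk]
  · have hσpos : (0:Int) < sigma := by omega
    have hstates : (0:Int) < sigma ^ k.toNat := pow_pos hσpos _
    set fb := forbidden.getD [] with hfb_def
    set N := (sigma ^ k.toNat).toNat with hN_def
    have hNe : ((N : Int)) = sigma ^ k.toNat := Int.toNat_of_nonneg (by omega)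
    have hN1 : 1 ≤ N := by omega
    obtain ⟨hdimsM, hwfrows, hbase⟩ := pv_base_interp sigma k.toNat fb m hs (by omega)
    rw [← hN_def] at hdimsM hwfrows hbase
    set M := (List.range N).map (fun (s : Nat) => pvRow sigma k.toNat N fb (s : Int)) with hM_def
    set rows := (List.range N).map (fun (s : Nat) => pvRowB sigma k.toNat fb (s : Int)) with hrows_def
    have hMlen : M.length = N := hdimsM.1
    simp only [count_sequences_matrix, count_sequences_matrix_alt, if_neg hnk, pvMatPow]
    rw [← hfb_def, ← hN_def, ← hM_def, ← hrows_def, hMlen]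
    by_cases hnk2 : n = k
    · -- p = 0: A sums the identity, B returns states % mod
      rw [if_pos hnk2]
      have hp0 : (n - k).toNat = 0 := by omega
      rw [hp0]
      have hid : pvMatPowGo (pvIdentity N) M m 0 = pvIdentity N := by
        rw [pvMatPowGo]
        simp
      rw [hid, pv_total_fold m _ N hN1 (pv_identity_interp m N).1, pv_identity_flat_sum, hNe]
    · rw [if_neg hnk2]
      have hp1 : 1 ≤ (n - k).toNat := by omega
      have hpow := pv_powgo_interp m hN1 (n - k).toNat (pvIdentity N) M
        (pv_identity_interp m N).1 hdimsM
      have hpowB := pv_powB_interp m hwfrows (n - k).toNat hp1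
      rw [pv_total_fold m _ N hN1 hpow.1]
      apply pv_mod_eq_of_castR
      rw [pv_flatten_cast m hpow.1, pv_B_sum_cast m hpowB.1, hpow.2, hpowB.2,
        (pv_identity_interp m N).2, hbase, one_mul]
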